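-- pv_equiv track=rewrite | github.com/SantiagoRomani/gdb_arm | inline-assembly/analyzer.py | find_delimiter
-- ===== SOURCE A (Python) =====
-- def find_delimiter(text, init_pos, end_pos, delimiters):
--     # type: (str, int, int, str) -> (int, int)
--     """returns the position within the text sequence (from init_pos up to end_pos-1)
--         where the closer delimiter occurs, or end_pos if no delimiter is present;
--         also returns the index of the closer delimiter inside the 'delimiters' string
--         (first -> index 0, second -> index 1, etc.), or -1 if no delimiter has been found
--     """
--     d_pos = end_pos                             # default delimiter position (end of the sequence)
--     d_index = -1                                # default index (no delimiter has been found yet)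
--     if delimiters is not None:                  # if there are delimiters
--         i = 0
--         for d_char in delimiters:                   # search every delimiter
--             dp = text.find(d_char, init_pos, end_pos)
--             if (dp > -1) and (dp < d_pos):              # if it finds a delimiter in a closer position
--                 d_pos = dp                                  # update current position and index
--                 d_index = i
--             i = i + 1                                   # advance index of next delimiter
--     return d_pos, d_index
-- ===== SOURCE B (Python) =====
-- def find_delimiter(text, init_pos, end_pos, delimiters):
--     # type: (str, int, int, str) -> (int, int)
--     """One-pass re-implementation: build a first-index table of the delimiters,
--     then scan the text range once, left to right, and stop at the first hit."""
--     if delimiters is None: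
--         return end_pos, -1
--     table = {}
--     i = 0
--     for c in delimiters:
--         if c not in table:
--             table[c] = i
--         i = i + 1
--     n = len(text)
--     lo = init_pos if init_pos >= 0 else n + init_pos
--     lo = 0 if lo < 0 else (lo if lo < n else n)
--     hi = end_pos if end_pos >= 0 else n + end_pos
--     hi = 0 if hi < 0 else (hi if hi < n else n)
--     p = lo
--     for c in text[lo:hi]:
--         if c in table:
--             return p, table[c]
--         p = p + 1
--     return end_pos, -1
-- ===== Notes on version B (the rewrite author's own statement) =====
-- stated objective: faster
-- what changed: Instead of calling text.find once per delimiter character (k scans of the range), B builds a first-index table of the delimiters once and makes a single left-to-right pass over the text range, returning at the first position whose character is in the table.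
-- intended difference: When end_pos is negative (end-relative) and a delimiter does occur in text[init_pos:end_pos], A returns (end_pos, -1) because its comparison 'dp < d_pos' compares an absolute index against the negative end_pos and can never fire, silently dropping the match; B returns the absolute position of the first delimiter and its index, which is the documented behaviour ('the position where the closer delimiter occurs'). — e.g. on find_delimiter("ab", 0, -1, some "a"): A returns (-1, -1), B returns (0, 0)
import Mathlib
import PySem

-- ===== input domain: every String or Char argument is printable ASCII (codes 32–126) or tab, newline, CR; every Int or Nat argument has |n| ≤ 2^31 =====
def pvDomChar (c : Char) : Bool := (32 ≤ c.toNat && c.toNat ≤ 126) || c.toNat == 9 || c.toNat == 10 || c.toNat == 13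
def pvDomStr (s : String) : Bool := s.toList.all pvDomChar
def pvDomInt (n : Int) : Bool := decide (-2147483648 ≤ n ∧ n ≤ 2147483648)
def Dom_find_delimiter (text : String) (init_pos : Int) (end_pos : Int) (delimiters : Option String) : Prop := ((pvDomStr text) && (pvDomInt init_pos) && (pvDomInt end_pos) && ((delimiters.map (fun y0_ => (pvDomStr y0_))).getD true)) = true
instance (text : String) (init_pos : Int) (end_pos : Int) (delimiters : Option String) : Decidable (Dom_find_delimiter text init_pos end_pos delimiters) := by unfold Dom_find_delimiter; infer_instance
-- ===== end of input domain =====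

-- B replaces A's one text.find scan per delimiter character by a first-index table of the
-- delimiters plus a single left-to-right pass over the text range (objective: faster).

-- ===== PORT A =====
-- the 'for d_char in delimiters' loop, state (d_pos, d_index, i)
def pvLoopA (text : String) (init_pos : Int) (end_pos : Int) : List Char → Int → Int → Int → Int × Int
  | [], d_pos, d_index, _ => (d_pos, d_index)
  | c :: rest, d_pos, d_index, i =>
    let dp := PySem.Str.findFrom text (String.ofList [c]) init_pos (some end_pos)
    if dp > -1 ∧ dp < d_pos then pvLoopA text init_pos end_pos rest dp i (i + 1)
    else pvLoopA text init_pos end_pos rest d_pos d_index (i + 1)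

def find_delimiter (text : String) (init_pos : Int) (end_pos : Int) (delimiters : Option String) : Int × Int :=
  match delimiters with
  | none => (end_pos, -1)
  | some ds => pvLoopA text init_pos end_pos ds.toList end_pos (-1) 0

-- ===== PORT B =====
-- 'for i, c in enumerate(delimiters): if c not in table: table[c] = i'
def pvBuild : List Char → Int → PySem.Dict Char Int → PySem.Dict Char Int
  | [], _, t => t
  | c :: rest, i, t =>
    pvBuild rest (i + 1) (match t.get? c with | some _ => t | none => t.insert c i)

-- Python slice-bound resolution as Source B writes it: negative offsets from the end, clamp to [0, n]
def pvClamp (i : Int) (n : Nat) : Int :=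
  let j := if 0 ≤ i then i else (n : Int) + i
  if j < 0 then 0 else if j < (n : Int) then j else (n : Int)

-- 'for c in text[lo:hi]: if c in table: return p, table[c]; p = p + 1'
def pvScan : List Char → Nat → PySem.Dict Char Int → Option (Nat × Int)
  | [], _, _ => none
  | c :: rest, p, t =>
    match t.get? c with
    | some i => some (p, i)
    | none => pvScan rest (p + 1) t

def find_delimiter_alt (text : String) (init_pos : Int) (end_pos : Int) (delimiters : Option String) : Int × Int :=
  match delimiters with
  | none => (end_pos, -1)
  | some ds =>
    let t := pvBuild ds.toList 0 PySem.Dict.empty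
    let L := text.toList
    let lo := pvClamp init_pos L.length
    let hi := pvClamp end_pos L.length
    match pvScan ((L.drop lo.toNat).take (hi.toNat - lo.toNat)) lo.toNat t with
    | some (p, j) => ((p : Int), j)
    | none => (end_pos, -1)

-- ===== PRECONDITION & SPEC =====
-- When end_pos is negative (end-relative) and a delimiter occurs in text[init_pos:end_pos],
-- A returns (end_pos, -1) because its test 'dp < d_pos' compares an absolute index with the
-- negative end_pos and can never fire; B returns the first delimiter's absolute position and
-- index, which is the documented behaviour.
def D_find_delimiter (text : String) (init_pos : Int) (end_pos : Int) (delimiters : Option String) : Prop :=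
  end_pos < 0 ∧
    ((PySem.List.slice text.toList (some init_pos) (some end_pos)).any
      (fun c => (delimiters.getD "").toList.contains c)) = true
instance (text : String) (init_pos : Int) (end_pos : Int) (delimiters : Option String) : Decidable (D_find_delimiter text init_pos end_pos delimiters) := by unfold D_find_delimiter; infer_instance

def Spec_find_delimiter (text : String) (init_pos : Int) (end_pos : Int) (delimiters : Option String) (out : Int × Int) : Prop := ¬ D_find_delimiter text init_pos end_pos delimiters → out = find_delimiter_alt text init_pos end_pos delimiters
instance (text : String) (init_pos : Int) (end_pos : Int) (delimiters : Option String) (out : Int × Int) : Decidable (Spec_find_delimiter text init_pos end_pos delimiters out) := by unfold Spec_find_delimiter; infer_instance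

def pvDiffWitness_find_delimiter : String × Int × Int × Option String := ("ab", 0, -1, some "a")
def pvDiffWitnessOut_find_delimiter : (Int × Int) × (Int × Int) := ((-1, -1), (0, 0))

-- ===== CLAIM (what is proved, stated in full; the proofs are below) =====
def Claim_unchanged_find_delimiter : Prop := ∀ (text : String) (init_pos : Int) (end_pos : Int) (delimiters : Option String), Dom_find_delimiter text init_pos end_pos delimiters → Spec_find_delimiter text init_pos end_pos delimiters (find_delimiter text init_pos end_pos delimiters)
def Claim_changed_find_delimiter : Prop := Dom_find_delimiter (pvDiffWitness_find_delimiter.1) (pvDiffWitness_find_delimiter.2.1) (pvDiffWitness_find_delimiter.2.2.1) (pvDiffWitness_find_delimiter.2.2.2) ∧ D_find_delimiter (pvDiffWitness_find_delimiter.1) (pvDiffWitness_find_delimiter.2.1) (pvDiffWitness_find_delimiter.2.2.1) (pvDiffWitness_find_delimiter.2.2.2) ∧ find_delimiter (pvDiffWitness_find_delimiter.1) (pvDiffWitness_find_delimiter.2.1) (pvDiffWitness_find_delimiter.2.2.1) (pvDiffWitness_find_delimiter.2.2.2) = pvDiffWitnessOut_find_delimiter.1 ∧ find_delimiter_alt (pvDiffWitness_find_delimiter.1)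 (pvDiffWitness_find_delimiter.2.1) (pvDiffWitness_find_delimiter.2.2.1) (pvDiffWitness_find_delimiter.2.2.2) = pvDiffWitnessOut_find_delimiter.2 ∧ pvDiffWitnessOut_find_delimiter.1 ≠ pvDiffWitnessOut_find_delimiter.2
def Claim_exact_find_delimiter : Prop := ∀ (text : String) (init_pos : Int) (end_pos : Int) (delimiters : Option String), Dom_find_delimiter text init_pos end_pos delimiters → D_find_delimiter text init_pos end_pos delimiters → find_delimiter text init_pos end_pos delimiters ≠ find_delimiter_alt text init_pos end_pos delimiters

-- ===== LEMMAS AND PROOFS =====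

-- scanning find of a single character, carrying an absolute position counter
def pvFF : List Char → Char → Nat → Int
  | [], _, _ => -1
  | x :: rest, c, p => if x = c then (p : Int) else pvFF rest c (p + 1)

-- A's loop with the find call abstracted to an arbitrary f
def genLoop (f : Char → Int) : List Char → Int → Int → Int → Int × Int
  | [], d_pos, d_index, _ => (d_pos, d_index)
  | c :: rest, d_pos, d_index, i =>
    if f c > -1 ∧ f c < d_pos then genLoop f rest (f c) i (i + 1)
    else genLoop f rest d_pos d_index (i + 1)

-- first index of c in a list (meaningful when c is a member)
def pvIdx (c : Char) : List Char → Int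
  | [] => 0
  | a :: rest => if a = c then 0 else 1 + pvIdx c rest

theorem pvLoopA_eq_gen (text : String) (a b : Int) (l : List Char) (p q i : Int) :
    pvLoopA text a b l p q i =
      genLoop (fun c => PySem.Str.findFrom text (String.ofList [c]) a (some b)) l p q i := by
  induction l generalizing p q i with
  | nil => rfl
  | cons c rest ih => simp only [pvLoopA, genLoop]; split_ifs <;> apply ih

theorem pvFF_neg_or_ge (s : List Char) (c : Char) (k : Nat) :
    pvFF s c k = -1 ∨ (k : Int) ≤ pvFF s c k := by
  induction s generalizing k with
  | nil => left; rfl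
  | cons x rest ih =>
    simp only [pvFF]
    split_ifs
    · right; omega
    · rcases ih (k + 1) with h | h
      · left; exact h
      · right; omega

theorem pvFF_not_mem {s : List Char} {c : Char} (h : c ∉ s) (k : Nat) : pvFF s c k = -1 := by
  induction s generalizing k with
  | nil => rfl
  | cons x rest ih =>
    simp only [List.mem_cons, not_or] at h
    simp only [pvFF, if_neg (fun hx : x = c => h.1 hx.symm)]
    exact ih h.2 (k + 1)

theorem pvFF_go (s : List Char) (c : Char) (k : Nat) :
    PySem.Chars.find.go [c] s k = pvFF s c k := by
  induction s generalizing k with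
  | nil => rfl
  | cons x rest ih =>
    rw [PySem.Chars.find.go, pvFF]
    have hpref : List.isPrefixOf [c] (x :: rest) = (c == x) := by
      simp [List.isPrefixOf]
    rw [hpref]
    by_cases hxc : x = c
    · simp [hxc]
    · have hbe : (c == x) = false := by simp [Ne.symm hxc]
      simp only [hbe, if_neg hxc, Bool.false_eq_true, if_false]
      exact ih (k + 1)

theorem pvFF_shift (s : List Char) (c : Char) (k : Nat) :
    pvFF s c k = if pvFF s c 0 = -1 then -1 else (k : Int) + pvFF s c 0 := by
  induction s generalizing k with
  | nil => simp [pvFF]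
  | cons x rest ih =>
    by_cases hx : x = c
    · simp [pvFF, hx]
    · rw [pvFF, if_neg hx, pvFF, if_neg hx, ih (k + 1), ih 1]
      rcases pvFF_neg_or_ge rest c 0 with h0 | h0 <;> split_ifs <;> push_cast at h0 ⊢ <;> omega

-- str.find of one character with start/end bounds = a scan of the slice from the resolved start
theorem findFrom_singleton (L : List Char) (c : Char) (a b : Int) :
    PySem.Chars.findFrom L [c] a (some b) =
      pvFF (PySem.List.slice L (some a) (some b)) c (PySem.List.clampIdx L.length a) := by
  have hdef : PySem.Chars.findFrom L [c] a (some b) =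
      (have n : Int := (L.length : Int)
       have e : Int := if n < b then n else if b < 0 then if b + n < 0 then 0 else b + n else b
       have st : Int := if a < 0 then if a + n < 0 then 0 else a + n else a
       if e < st then -1
       else
         have r := PySem.Chars.find (List.drop st.toNat (List.take e.toNat L)) [c]
         if r = -1 then -1 else st + r) := rfl
  rw [hdef]
  set n : Int := (L.length : Int) with hn
  set e : Int := if n < b then n else if b < 0 then if b + n < 0 then 0 else b + n else b with he
  set st : Int := if a < 0 then if a + n < 0 then 0 else a + n else a with hst
  have hst0 : 0 ≤ st := by rw [hst]; split_ifs <;> omega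
  have he0 : 0 ≤ e ∧ e ≤ n := by rw [he]; split_ifs <;> omega
  have hca : PySem.List.clampIdx L.length a = min st.toNat L.length := by
    rw [PySem.List.clampIdx, hst]; split_ifs <;> omega
  have hcb : PySem.List.clampIdx L.length b = e.toNat := by
    rw [PySem.List.clampIdx, he]; split_ifs <;> omega
  simp only [PySem.List.slice, hca, hcb]
  by_cases hlt : e < st
  · rw [if_pos hlt]
    have hz : e.toNat - min st.toNat L.length = 0 := by omega
    rw [hz]
    simp [pvFF]
  · rw [if_neg hlt]
    have hmin : min st.toNat L.length = st.toNat := by omega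
    rw [hmin]
    have hseg : List.drop st.toNat (List.take e.toNat L) =
        List.take (e.toNat - st.toNat) (List.drop st.toNat L) := by
      rw [List.drop_take]
    rw [hseg]
    simp only [PySem.Chars.find, pvFF_go]
    rw [pvFF_shift _ c st.toNat]
    have : ((st.toNat : Int)) = st := Int.toNat_of_nonneg hst0
    rw [this]

theorem genLoop_stuck (f : Char → Int) (ds : List Char) (d_pos d_idx : Int)
    (h : ∀ c ∈ ds, ¬ (f c > -1 ∧ f c < d_pos)) :
    ∀ i, genLoop f ds d_pos d_idx i = (d_pos, d_idx) := by
  induction ds with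
  | nil => intro i; rfl
  | cons c rest ih =>
    intro i
    simp only [genLoop]
    rw [if_neg (h c (List.mem_cons_self))]
    exact ih (fun c' hc' => h c' (List.mem_cons_of_mem _ hc')) (i + 1)

theorem genLoop_congr (f g : Char → Int) (ds : List Char) (h : ∀ c ∈ ds, f c = g c) :
    ∀ p q i, genLoop f ds p q i = genLoop g ds p q i := by
  induction ds with
  | nil => intro p q i; rfl
  | cons c rest ih =>
    intro p q i
    have hc := h c (List.mem_cons_self)
    simp only [genLoop, hc]
    split_ifs <;> exact ih (fun c' hc' => h c' (List.mem_cons_of_mem _ hc')) _ _ _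

theorem genLoop_hit (f : Char → Int) (c0 : Char) (p0 : Nat)
    (h1 : ∀ c, f c = -1 ∨ (p0 : Int) ≤ f c) (h2 : ∀ c, c ≠ c0 → f c ≠ (p0 : Int))
    (h3 : f c0 = (p0 : Int)) :
    ∀ ds, c0 ∈ ds → ∀ d_pos d_idx i, (p0 : Int) < d_pos →
      genLoop f ds d_pos d_idx i = ((p0 : Int), i + pvIdx c0 ds) := by
  intro ds
  induction ds with
  | nil => intro h; cases h
  | cons c rest ih =>
    intro hmem d_pos d_idx i hlt
    by_cases hc : c = c0
    · subst hc
      simp only [genLoop, h3]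
      rw [if_pos ⟨by omega, hlt⟩]
      rw [genLoop_stuck f rest (p0 : Int) i
        (by intro c' _; rcases h1 c' with h | h <;> omega)]
      simp [pvIdx]
    · have hmem' : c0 ∈ rest := by
        rcases List.mem_cons.mp hmem with h | h
        · exact absurd h.symm hc
        · exact h
      simp only [genLoop]
      by_cases hcond : f c > -1 ∧ f c < d_pos
      · rw [if_pos hcond]
        have hgt : (p0 : Int) < f c := by
          rcases h1 c with h | h
          · omega
          · have := h2 c hc; omega
        rw [ih hmem' (f c) i (i + 1) hgt]
        simp only [pvIdx, if_neg hc, Prod.mk.injEq]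
        refine ⟨by simp, by ring⟩
      · rw [if_neg hcond]
        rw [ih hmem' d_pos d_idx (i + 1) hlt]
        simp only [pvIdx, if_neg hc, Prod.mk.injEq]
        refine ⟨by simp, by ring⟩

theorem pvBuild_get (c : Char) : ∀ (ds : List Char) (i : Int) (t : PySem.Dict Char Int),
    (pvBuild ds i t).get? c =
      match t.get? c with
      | some v => some v
      | none => if c ∈ ds then some (i + pvIdx c ds) else none := by
  intro ds
  induction ds with
  | nil =>
    intro i t
    cases h : t.get? c <;> simp [pvBuild, h]
  | cons a rest ih =>
    intro i t
    simp only [pvBuild]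
    cases hta : t.get? a with
    | some v =>
      rw [ih]
      by_cases hca : c = a
      · subst hca; rw [hta]
      · cases htc : t.get? c with
        | some w => rfl
        | none =>
          simp only [List.mem_cons, pvIdx]
          rw [if_neg (fun h : a = c => hca h.symm)]
          by_cases hcr : c ∈ rest
          · simp only [if_pos hcr, if_pos (Or.inr hcr)]
            congr 1; ring
          · rw [if_neg hcr, if_neg (by tauto)]
    | none =>
      rw [ih]
      by_cases hca : c = a
      · subst hca
        rw [PySem.Dict.get?_insert_self, hta]
        simp [pvIdx]
      · rw [PySem.Dict.get?_insert_of_ne _ _ hca]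
        cases htc : t.get? c with
        | some w => rfl
        | none =>
          simp only [List.mem_cons, pvIdx]
          rw [if_neg (fun h : a = c => hca h.symm)]
          by_cases hcr : c ∈ rest
          · simp only [if_pos hcr, if_pos (Or.inr hcr)]
            congr 1; ring
          · rw [if_neg hcr, if_neg (by tauto)]

theorem pvTable_get (ds : List Char) (c : Char) :
    (pvBuild ds 0 PySem.Dict.empty).get? c = if c ∈ ds then some (pvIdx c ds) else none := by
  rw [pvBuild_get, PySem.Dict.get?_empty]
  split_ifs with h
  · simp
  · rfl

theorem pvScan_none (t : PySem.Dict Char Int) :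
    ∀ (s : List Char) (p : Nat), (∀ c ∈ s, t.get? c = none) → pvScan s p t = none := by
  intro s
  induction s with
  | nil => intro p _; rfl
  | cons a rest ih =>
    intro p h
    simp only [pvScan, h a (List.mem_cons_self)]
    exact ih (p + 1) (fun c hc => h c (List.mem_cons_of_mem _ hc))

theorem pvScan_some (t : PySem.Dict Char Int) :
    ∀ (s : List Char) (p : Nat), (∃ c ∈ s, (t.get? c).isSome) →
      ∃ q j, pvScan s p t = some (q, j) := by
  intro s
  induction s with
  | nil => intro p h; simp at h
  | cons a rest ih =>
    intro p h
    simp only [pvScan]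
    cases hta : t.get? a with
    | some v => exact ⟨p, v, rfl⟩
    | none =>
      apply ih (p + 1)
      rcases h with ⟨c, hc, hsome⟩
      rcases List.mem_cons.mp hc with h | h
      · subst h; rw [hta] at hsome; simp at hsome
      · exact ⟨c, h, hsome⟩

theorem mainLoop (ds : List Char) :
    ∀ (s : List Char) (p0 : Nat) (e : Int),
      (∀ k : Nat, k < s.length → (p0 : Int) + k < e) →
      genLoop (fun c => pvFF s c p0) ds e (-1) 0
        = (match pvScan s p0 (pvBuild ds 0 PySem.Dict.empty) with
           | some (p, j) => ((p : Int), j)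
           | none => (e, -1)) := by
  intro s
  induction s with
  | nil =>
    intro p0 e _
    rw [genLoop_stuck _ ds e (-1) (by intro c _; simp [pvFF]) 0]
    rfl
  | cons a rest ih =>
    intro p0 e hb
    by_cases ha : a ∈ ds
    · rw [genLoop_hit (fun c => pvFF (a :: rest) c p0) a p0
        (by intro c
            simp only [pvFF]
            split_ifs
            · right; omega
            · rcases pvFF_neg_or_ge rest c (p0 + 1) with h | h
              · left; exact h
              · right; push_cast at h ⊢; omega)
        (by intro c hc
            simp only [pvFF, if_neg (fun h : a = c => hc h.symm)]
            rcases pvFF_neg_or_ge rest c (p0 + 1) with h | h <;> push_cast at h ⊢ <;> omega)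
        (by simp [pvFF])
        ds ha e (-1) 0 (by have := hb 0 (by simp); push_cast at this ⊢; omega)]
      simp only [pvScan, pvTable_get ds a, if_pos ha]
      simp
    · have hcg := genLoop_congr (fun c => pvFF (a :: rest) c p0) (fun c => pvFF rest c (p0 + 1)) ds
        (by intro c hc
            have : a ≠ c := fun h => ha (h ▸ hc)
            simp [pvFF, this])
      rw [hcg e (-1) 0]
      rw [ih (p0 + 1) e
        (by intro k hk
            have := hb (k + 1) (by simpa using Nat.succ_lt_succ hk)
            push_cast at this ⊢; omega)]
      simp only [pvScan, pvTable_get ds a, if_neg ha]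

-- resolution of Source B's clamp against PySem's clampIdx
theorem pvClamp_toNat (i : Int) (n : Nat) : (pvClamp i n).toNat = PySem.List.clampIdx n i := by
  rw [pvClamp, PySem.List.clampIdx]
  split_ifs <;> omega

theorem clampIdx_le_of_nonneg (n : Nat) (b : Int) (hb : 0 ≤ b) :
    (PySem.List.clampIdx n b : Int) ≤ b := by
  rw [PySem.List.clampIdx]; split_ifs <;> omega

theorem slice_eq_port (L : List Char) (a b : Int) :
    PySem.List.slice L (some a) (some b) =
      (L.drop (pvClamp a L.length).toNat).take ((pvClamp b L.length).toNat - (pvClamp a L.length).toNat) := by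
  simp only [PySem.List.slice, pvClamp_toNat]

-- the two ports agree once delimiters = some ds, outside D_
theorem agree_some (text : String) (a b : Int) (ds : String)
    (hnd : ¬ D_find_delimiter text a b (some ds)) :
    find_delimiter text a b (some ds) = find_delimiter_alt text a b (some ds) := by
  simp only [find_delimiter, find_delimiter_alt]
  rw [pvLoopA_eq_gen]
  set L : List Char := text.toList with hL
  set lo : Nat := (pvClamp a L.length).toNat with hlo
  set hi : Nat := (pvClamp b L.length).toNat with hhi
  set s : List Char := (L.drop lo).take (hi - lo) with hs
  have hslice : PySem.List.slice L (some a) (some b) = s := by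
    rw [slice_eq_port]
  have hclamp : PySem.List.clampIdx L.length a = lo := by
    rw [hlo, pvClamp_toNat]
  have hf : ∀ c ∈ ds.toList, PySem.Str.findFrom text (String.ofList [c]) a (some b) = pvFF s c lo := by
    intro c _
    have h1 : PySem.Str.findFrom text (String.ofList [c]) a (some b)
        = PySem.Chars.findFrom L [c] a (some b) := by
      have h2 : (String.ofList [c]).toList = [c] := by simp
      simp [PySem.Str.findFrom_eq, h2]
      rfl
    rw [h1, findFrom_singleton, hslice, hclamp]
  rw [genLoop_congr _ (fun c => pvFF s c lo) ds.toList hf b (-1) 0]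
  by_cases hbpos : 0 ≤ b
  · rw [mainLoop ds.toList s lo b ?hb]
    case hb =>
      intro k hk
      have hlen : s.length ≤ hi - lo := by
        rw [hs]; simp [List.length_take, List.length_drop]
      have hhib : (hi : Int) ≤ b := by
        rw [hhi, pvClamp_toNat]
        exact clampIdx_le_of_nonneg _ _ hbpos
      omega
  · have hbneg : b < 0 := by omega
    have hnomatch : ∀ c ∈ s, c ∉ ds.toList := by
      intro c hc hcd
      apply hnd
      refine ⟨hbneg, ?_⟩
      rw [hslice]
      simp only [Option.getD_some]
      exact List.any_eq_true.mpr ⟨c, hc, by simpa using hcd⟩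
    rw [genLoop_stuck _ ds.toList b (-1)
      (by intro c hc
          rw [pvFF_not_mem (fun hcs => hnomatch c hcs hc) lo]
          omega) 0]
    rw [pvScan_none _ s lo
      (by intro c hc
          rw [pvTable_get, if_neg (hnomatch c hc)])]

-- ===== VERDICT (by name: the statement is the Claim_ definition above) =====
theorem find_delimiter_spec : Claim_unchanged_find_delimiter := by
  intro text a b delims _ hnd
  cases delims with
  | none => rfl
  | some ds => exact agree_some text a b ds hnd

theorem find_delimiter_changed : Claim_changed_find_delimiter := by
  unfold Claim_changed_find_delimiter
  decide

theorem find_delimiter_tight : Claim_exact_find_delimiter := by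
  intro text a b delims _ hD
  rcases hD with ⟨hbneg, hany⟩
  cases delims with
  | none => simp at hany
  | some ds =>
    simp only [Option.getD_some] at hany
    rcases List.any_eq_true.mp hany with ⟨c, hcs, hcd⟩
    have hcd' : c ∈ ds.toList := by simpa using hcd
    -- A returns (b, -1)
    have hA : find_delimiter text a b (some ds) = (b, -1) := by
      simp only [find_delimiter]
      rw [pvLoopA_eq_gen]
      exact genLoop_stuck _ ds.toList b (-1) (by intro c' _ h; omega) 0
    -- B returns a found position ≥ 0
    have hcs' : c ∈ (text.toList.drop (pvClamp a text.toList.length).toNat).take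
        ((pvClamp b text.toList.length).toNat - (pvClamp a text.toList.length).toNat) := by
      rw [← slice_eq_port]; exact hcs
    rcases pvScan_some (pvBuild ds.toList 0 PySem.Dict.empty) _ (pvClamp a text.toList.length).toNat
        ⟨c, hcs', by rw [pvTable_get, if_pos hcd']; rfl⟩ with ⟨q, j, hq⟩
    have hB : find_delimiter_alt text a b (some ds) = ((q : Int), j) := by
      simp only [find_delimiter_alt]
      rw [hq]
    rw [hA, hB]
    intro heq
    have := congrArg Prod.fst heq
    simp at this
    omega
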